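-- pv_equiv track=rewrite | github.com/rafaelmaframg/BootCamp-100DaysOfCodePythonPro | Day11/art/arts.py | card_pc
-- ===== SOURCE A (Python) =====
-- def check(num):
--     """
--         The function to check the values and set the better design.
--
--         Parameters:
--             num (int): The number to check.
--
--         Returns:
--             (String): Return a string with the design.
--     """
--
--
--     if num[:2] == '10':
--         dig = '0'
--         num = '1'
--
--     elif num[0] == 'A' or num[0] == '1':
--         num = 'A'
--         dig = ' '
--
--     else:
--         num = num[0]
--         dig = ' '
--     return f'{num}{dig}'
--
-- def card_pc(user, computer):
--     """
--         The function that receive the list of cards and return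
--         a string with the design of the ASCII cards.
--
--         Parameters:
--             user (list): The number list of user.
--             computer (list) The number list of computer
--
--         Returns:
--             carta (string): a string that contains the result.
--     """
--     nipe = '♠'
--     carta = f"""User {''.join(['      ' for x in range(len(user)+len(computer))])}      Computer
-- {''.join(['┌─────────┐' for x in user])}    {''.join(['┌─────────┐' for x in computer])}
-- {''.join([f'│{check(x)}       │' for x in user])}    {''.join([f'│{check(x)}       │' for x in computer])}
-- {''.join(['│         │' for x in user])}    {''.join(['│         │' for x in computer])}
-- {''.join(['│         │' for x in user])}    {''.join(['│         │' for x in computer])}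
-- {''.join([f'│    {nipe}    │' for x in user])}    {''.join([f'│    {nipe}    │' for x in computer])}
-- {''.join(['│         │' for x in user])}    {''.join(['│         │' for x in computer])}
-- {''.join(['│         │' for x in user])}    {''.join(['│         │' for x in computer])}
-- {''.join([f'│       {check(x)}│' for x in user])}    {''.join([f'│       {check(x)}│' for x in computer])}
-- {''.join(['└─────────┘' for x in user])}    {''.join(['└─────────┘' for x in computer])}
--  """
--     return carta
-- ===== SOURCE B (Python) =====
-- def _face(num):
--     if num[:2] == '10':
--         return '10'
--     ch = 'A' if num[0] in ('A', '1') else num[0]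
--     return ch + ' '
--
-- def _frag(x):
--     c = _face(x)
--     return ['┌─────────┐', f'│{c}       │', '│         │', '│         │',
--             '│    ♠    │', '│         │', '│         │', f'│       {c}│',
--             '└─────────┘']
--
-- def card_pc(user, computer):
--     suffix = ['     ', '', '', ' ', '', '', ' ', '', '']
--     uf = [_frag(x) for x in user]
--     cf = [_frag(x) for x in computer]
--     header = 'User ' + '      ' * (len(user) + len(computer)) + '      Computer'
--     rows = [header]
--     for i in range(9):
--         rows.append(''.join(f[i] for f in uf) + '    ' + ''.join(f[i] for f in cf) + suffix[i])
--     rows.append(' ')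
--     return '\n'.join(rows)
-- ===== Notes on version B (the rewrite author's own statement) =====
-- stated objective: alternative
-- what changed: B renders each card once as a 9-line fragment list and transposes fragments into output rows (joined with explicit per-row suffixes and a final newline join), instead of A's single giant f-string that re-scans each hand with a separate comprehension per row.
import Mathlib
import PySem

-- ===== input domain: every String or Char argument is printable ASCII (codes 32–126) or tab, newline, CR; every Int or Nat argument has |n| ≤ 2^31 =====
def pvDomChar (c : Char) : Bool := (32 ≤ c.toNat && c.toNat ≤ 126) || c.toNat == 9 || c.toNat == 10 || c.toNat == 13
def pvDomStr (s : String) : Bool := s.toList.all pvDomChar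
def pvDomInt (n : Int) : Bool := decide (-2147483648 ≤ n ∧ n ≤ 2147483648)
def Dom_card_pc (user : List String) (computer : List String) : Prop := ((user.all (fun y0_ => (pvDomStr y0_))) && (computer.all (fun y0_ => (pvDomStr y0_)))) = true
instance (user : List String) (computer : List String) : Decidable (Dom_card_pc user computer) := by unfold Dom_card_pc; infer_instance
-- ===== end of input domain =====

-- B renders each card as a 9-line fragment and transposes, instead of A's one giant f-string; same output, same cost (objective: alternative).

-- ===== PORT A =====
-- check(num): num[:2] == '10' → take 2; num[0] on "" raises IndexError in Python (excluded by Pre_),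
-- here the [] branch returns "" (never reached under Pre_).
def checkA (num : String) : String :=
  let l := num.toList
  if l.take 2 = ['1', '0'] then "10"
  else
    match l with
    | [] => ""
    | c :: _ => if c = 'A' ∨ c = '1' then "A " else String.ofList [c, ' ']

def card_pc (user : List String) (computer : List String) : String :=
  "User " ++ String.join ((List.range (user.length + computer.length)).map (fun _ => "      ")) ++ "      Computer" ++ "\n"
  ++ String.join (user.map (fun _ => "┌─────────┐")) ++ "    " ++ String.join (computer.map (fun _ => "┌─────────┐")) ++ "     " ++ "\n"
  ++ String.join (user.map (fun x => "│" ++ checkA x ++ "       │")) ++ "    " ++ String.join (computer.map (fun x => "│" ++ checkA x ++ "       │")) ++ "\n"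
  ++ String.join (user.map (fun _ => "│         │")) ++ "    " ++ String.join (computer.map (fun _ => "│         │")) ++ "\n"
  ++ String.join (user.map (fun _ => "│         │")) ++ "    " ++ String.join (computer.map (fun _ => "│         │")) ++ " " ++ "\n"
  ++ String.join (user.map (fun _ => "│    ♠    │")) ++ "    " ++ String.join (computer.map (fun _ => "│    ♠    │")) ++ "\n"
  ++ String.join (user.map (fun _ => "│         │")) ++ "    " ++ String.join (computer.map (fun _ => "│         │")) ++ "\n"
  ++ String.join (user.map (fun _ => "│         │")) ++ "    " ++ String.join (computer.map (fun _ => "│         │")) ++ " " ++ "\n"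
  ++ String.join (user.map (fun x => "│       " ++ checkA x ++ "│")) ++ "    " ++ String.join (computer.map (fun x => "│       " ++ checkA x ++ "│")) ++ "\n"
  ++ String.join (user.map (fun _ => "└─────────┘")) ++ "    " ++ String.join (computer.map (fun _ => "└─────────┘")) ++ "\n" ++ " "

-- ===== PORT B =====
def faceB (num : String) : String :=
  let l := num.toList
  if l.take 2 = ['1', '0'] then "10"
  else
    match l with
    | [] => ""   -- IndexError in Python B (excluded by Pre_)
    | c0 :: _ =>
      let ch := if c0 = 'A' ∨ c0 = '1' then 'A' else c0
      String.ofList [ch, ' ']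

def fragB (x : String) : List String :=
  let c := faceB x
  ["┌─────────┐", "│" ++ c ++ "       │", "│         │", "│         │",
   "│    ♠    │", "│         │", "│         │", "│       " ++ c ++ "│",
   "└─────────┘"]

-- '\n'.join(rows): exact hand transliteration of str.join for the separator "\n"
def joinNL : List String → String
  | [] => ""
  | x :: xs => xs.foldl (fun r s => r ++ "\n" ++ s) x

def card_pc_alt (user : List String) (computer : List String) : String :=
  let suffix : List String := ["     ", "", "", " ", "", "", " ", "", ""]
  let uf := user.map fragB
  let cf := computer.map fragB
  let header := "User " ++ String.join (List.replicate (user.length + computer.length) "      ") ++ "      Computer"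
  let rows := (List.range 9).map (fun i =>
    String.join (uf.map (fun f => f.getD i "")) ++ "    "
      ++ String.join (cf.map (fun f => f.getD i "")) ++ suffix.getD i "")
  joinNL (header :: (rows ++ [" "]))

-- ===== PRECONDITION & SPEC =====
-- Pre_ excludes inputs holding an empty-string card: there Python's num[0] raises IndexError in both A and B.
def Pre_card_pc (user : List String) (computer : List String) : Prop :=
  (∀ s ∈ user, s ≠ "") ∧ (∀ s ∈ computer, s ≠ "")
instance (user : List String) (computer : List String) : Decidable (Pre_card_pc user computer) := by unfold Pre_card_pc; infer_instance
def pvWitness_card_pc : List String × List String := (["10", "A"], ["3"])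

def Spec_card_pc (user : List String) (computer : List String) (out : String) : Prop := out = card_pc_alt user computer
instance (user : List String) (computer : List String) (out : String) : Decidable (Spec_card_pc user computer out) := by unfold Spec_card_pc; infer_instance

-- ===== CLAIM (what is proved, stated in full; the proofs are below) =====
def Claim_equal_card_pc : Prop := ∀ (user : List String) (computer : List String), Dom_card_pc user computer → Pre_card_pc user computer → Spec_card_pc user computer (card_pc user computer)

-- ===== LEMMAS AND PROOFS =====

theorem check_eq (s : String) (h : s ≠ "") : checkA s = faceB s := by
  unfold checkA faceB
  have hne : s.toList ≠ [] := fun hl => h (by simpa using congrArg String.ofList hl)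
  cases hl : s.toList with
  | nil => exact absurd hl hne
  | cons c t => simp only []; split_ifs <;> rfl

theorem map_check_eq (l : List String) (h : ∀ s ∈ l, s ≠ "") (f : String → String) :
    l.map (fun x => f (checkA x)) = l.map (fun x => f (faceB x)) :=
  List.map_congr_left (fun s hs => by rw [check_eq s (h s hs)])

-- ===== VERDICT (by name: the statement is the Claim_ definition above) =====
theorem card_pc_spec : Claim_equal_card_pc := by
  intro user computer _ hpre
  show card_pc user computer = card_pc_alt user computer
  obtain ⟨hu, hc⟩ := hpre
  unfold card_pc card_pc_alt
  simp only [List.range_succ, List.range_zero, List.nil_append, List.cons_append,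
    List.map_cons, List.map_nil, List.map_map, joinNL, List.foldl,
    Function.comp_def, fragB, List.getD_cons_zero, List.getD_cons_succ]
  rw [map_check_eq user hu (fun c => "│" ++ c ++ "       │"),
      map_check_eq user hu (fun c => "│       " ++ c ++ "│"),
      map_check_eq computer hc (fun c => "│" ++ c ++ "       │"),
      map_check_eq computer hc (fun c => "│       " ++ c ++ "│")]
  have hrep : (List.range (user.length + computer.length)).map (fun _ => "      ")
      = List.replicate (user.length + computer.length) "      " := by
    simp [List.map_const']
  rw [hrep]
  simp [String.append_assoc]
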